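-- pv_equiv track=rewrite | github.com/JHoooooon/getting_start_python_codingtest | longest_scarf/main.py | get_mostidx
-- ===== SOURCE A (Python) =====
-- def get_mostidx(scarf: list[int], scarf_len: int):
--     """
--     scarf 모양의 가장왼쪽 인덱스와 가장오른쪽 인덱스를 반환
--
--     Args:
--         scarf (list[int]):
--             스카프 모양의 리스트
--         scarf_len (int):
--             스카프의 개수
--
--     Return (list[Dict[str, int]]):
--         스카프 모양을 가진 배열
--     """
--
--     leftmost_idx = {}
--     rightmost_idx = {}
--
--     for idx in range(scarf_len):
--         color = scarf[idx]
--
--         if not color in leftmost_idx: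
--             leftmost_idx[color] = idx
--             rightmost_idx[color] = idx
--         else:
--             rightmost_idx[color] = idx
--
--     return [leftmost_idx, rightmost_idx]
-- ===== SOURCE B (Python) =====
-- def get_mostidx(scarf: list[int], scarf_len: int):
--     """Search-based reformulation: take the scanned prefix, list its distinct
--     colors in first-appearance order, and find each color's endpoints directly
--     with list.index on the prefix and on its reversal."""
--     prefix = scarf[:max(scarf_len, 0)]
--     colors = list(dict.fromkeys(prefix))
--     rev = prefix[::-1]
--     leftmost_idx = {c: prefix.index(c) for c in colors}
--     rightmost_idx = {c: len(prefix) - 1 - rev.index(c) for c in colors}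
--     return [leftmost_idx, rightmost_idx]
-- ===== Notes on version B (the rewrite author's own statement) =====
-- stated objective: alternative
-- what changed: Replaces A's single stateful index scan that updates two dicts as it goes by a search-based algorithm: take the scanned prefix, list its distinct colors once (dict.fromkeys), then find each color's leftmost endpoint with list.index on the prefix and its rightmost endpoint with list.index on the reversed prefix.
import Mathlib
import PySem

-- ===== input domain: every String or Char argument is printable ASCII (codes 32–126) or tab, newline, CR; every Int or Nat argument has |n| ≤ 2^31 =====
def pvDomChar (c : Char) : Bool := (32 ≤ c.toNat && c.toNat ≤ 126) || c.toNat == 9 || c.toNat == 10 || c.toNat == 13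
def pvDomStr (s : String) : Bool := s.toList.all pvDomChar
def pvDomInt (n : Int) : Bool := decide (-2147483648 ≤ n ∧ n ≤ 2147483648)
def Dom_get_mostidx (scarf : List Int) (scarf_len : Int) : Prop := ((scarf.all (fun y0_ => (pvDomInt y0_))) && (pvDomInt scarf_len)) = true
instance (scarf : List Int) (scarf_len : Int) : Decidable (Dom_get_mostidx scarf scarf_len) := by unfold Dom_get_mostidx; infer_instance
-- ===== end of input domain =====

-- B replaces A's stateful scan over indices by per-color endpoint searches
-- (distinct colors, then list.index on the prefix and on its reversal); alternative decomposition, same output.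

-- ===== PORT A =====
-- one combined pass over range(scarf_len); state = (leftmost, rightmost); none = IndexError
def get_mostidx (scarf : List Int) (scarf_len : Int) : List (List (Int × Int)) :=
  match (PySem.List.pyRange 0 scarf_len 1).foldl
      (fun (st : Option (PySem.Dict Int Int × PySem.Dict Int Int)) idx =>
        st.bind fun LR =>
          (PySem.List.pyGet? scarf idx).map fun color =>
            if !(LR.1.contains color) then
              (LR.1.insert color idx, LR.2.insert color idx)
            else
              (LR.1, LR.2.insert color idx))
      (some (PySem.Dict.empty, PySem.Dict.empty)) with
  | some LR => [LR.1.items, LR.2.items]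
  | none => []   -- IndexError: excluded by Pre_

-- ===== PORT B =====
-- prefix = scarf[:max(scarf_len,0)]; colors = list(dict.fromkeys(prefix)) = PySem.List.dedup;
-- prefix[::-1] = reverse (PySem.List.slice?_none_none_neg_one); each dict comprehension is a fold of inserts.
-- prefix.index(c) / rev.index(c) never raise in B (c is drawn from prefix), so index?'s getD default is unreachable.
def get_mostidx_alt (scarf : List Int) (scarf_len : Int) : List (List (Int × Int)) :=
  let pre := PySem.List.slice scarf none (some (max scarf_len 0))
  let colors := PySem.List.dedup pre
  let rev := pre.reverse
  let leftmost := colors.foldl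
      (fun (d : PySem.Dict Int Int) c =>
        d.insert c (((PySem.List.index? pre c).getD 0 : Nat) : Int)) PySem.Dict.empty
  let rightmost := colors.foldl
      (fun (d : PySem.Dict Int Int) c =>
        d.insert c ((pre.length : Int) - 1 - (((PySem.List.index? rev c).getD 0 : Nat) : Int))) PySem.Dict.empty
  [leftmost.items, rightmost.items]

-- ===== PRECONDITION & SPEC =====
-- A indexes scarf[idx] for idx in range(scarf_len): it raises IndexError iff scarf_len exceeds len(scarf)
def Pre_get_mostidx (scarf : List Int) (scarf_len : Int) : Prop := scarf_len ≤ (scarf.length : Int)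
instance (scarf : List Int) (scarf_len : Int) : Decidable (Pre_get_mostidx scarf scarf_len) := by unfold Pre_get_mostidx; infer_instance
def pvWitness_get_mostidx : List Int × Int := ([2, 1, 2, 3], 4)

def Spec_get_mostidx (scarf : List Int) (scarf_len : Int) (out : List (List (Int × Int))) : Prop := out = get_mostidx_alt scarf scarf_len
instance (scarf : List Int) (scarf_len : Int) (out : List (List (Int × Int))) : Decidable (Spec_get_mostidx scarf scarf_len out) := by unfold Spec_get_mostidx; infer_instance

-- ===== CLAIM (what is proved, stated in full; the proofs are below) =====
def Claim_equal_get_mostidx : Prop := ∀ (scarf : List Int) (scarf_len : Int), Dom_get_mostidx scarf scarf_len → Pre_get_mostidx scarf scarf_len → Spec_get_mostidx scarf scarf_len (get_mostidx scarf scarf_len)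

-- ===== LEMMAS AND PROOFS =====

-- first index of c in p, as B computes it
def pvFirst (p : List Int) (c : Int) : Int := (((PySem.List.index? p c).getD 0 : Nat) : Int)
-- last index of c in p, as B computes it
def pvLast (p : List Int) (c : Int) : Int :=
  (p.length : Int) - 1 - (((PySem.List.index? p.reverse c).getD 0 : Nat) : Int)

theorem pv_dedup_snoc (t : List Int) (c : Int) :
    PySem.List.dedup (t ++ [c]) =
      if c ∈ t then PySem.List.dedup t else PySem.List.dedup t ++ [c] := by
  rw [PySem.List.dedup_eq_ofList, PySem.Set.ofList_eq_foldl, List.foldl_append]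
  rw [← PySem.Set.ofList_eq_foldl, ← PySem.List.dedup_eq_ofList]
  simp [PySem.Set.add, PySem.Set.contains]

theorem pv_first_mem (t : List Int) (c x : Int) (hx : x ∈ t) :
    pvFirst (t ++ [c]) x = pvFirst t x := by
  unfold pvFirst
  rw [PySem.List.index?_append_of_mem _ hx]

theorem pv_first_new (t : List Int) (c : Int) (hc : c ∉ t) :
    pvFirst (t ++ [c]) c = (t.length : Int) := by
  unfold pvFirst
  rw [PySem.List.index?_append_singleton_self t c hc]
  rfl

theorem pv_last_new (t : List Int) (c : Int) :
    pvLast (t ++ [c]) c = (t.length : Int) := by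
  unfold pvLast
  rw [List.reverse_append]
  simp only [List.reverse_singleton, List.singleton_append, PySem.List.index?_cons_self,
    Option.getD_some, List.length_append, List.length_singleton]
  push_cast
  ring

theorem pv_last_mem (t : List Int) (c x : Int) (hx : x ∈ t) (hne : x ≠ c) :
    pvLast (t ++ [c]) x = pvLast t x := by
  unfold pvLast
  rw [List.reverse_append]
  simp only [List.reverse_singleton, List.singleton_append]
  rw [PySem.List.index?_cons_of_ne _ (Ne.symm hne)]
  obtain ⟨j, hj⟩ := Option.isSome_iff_exists.mp
    ((PySem.List.index?_isSome_iff t.reverse x).mpr (List.mem_reverse.mpr hx))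
  rw [hj]
  simp only [Option.map_some, Option.getD_some, List.length_append, List.length_singleton]
  push_cast
  ring

theorem pv_keys_of_items (d : PySem.Dict Int Int) (t : List Int) (f : Int → Int)
    (h : d.items = (PySem.List.dedup t).map (fun c => (c, f c))) (c : Int) :
    d.contains c = decide (c ∈ t) := by
  rw [PySem.Dict.contains_eq_decide_mem_keys]
  have hk : d.keys = PySem.List.dedup t := by
    show d.items.map Prod.fst = _
    rw [h, List.map_map]
    exact List.map_id _
  rw [hk]
  simp [PySem.List.mem_dedup]

-- characterization of A's combined fold after the first m valid indices
theorem pv_A_char (scarf : List Int) (m : Nat) (hm : m ≤ scarf.length) :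
    ∃ L R : PySem.Dict Int Int,
      (PySem.List.pyRange 0 (m : Int) 1).foldl
        (fun (st : Option (PySem.Dict Int Int × PySem.Dict Int Int)) idx =>
          st.bind fun LR =>
            (PySem.List.pyGet? scarf idx).map fun color =>
              if !(LR.1.contains color) then
                (LR.1.insert color idx, LR.2.insert color idx)
              else
                (LR.1, LR.2.insert color idx))
        (some (PySem.Dict.empty, PySem.Dict.empty)) = some (L, R)
      ∧ L.items = (PySem.List.dedup (scarf.take m)).map (fun c => (c, pvFirst (scarf.take m) c))
      ∧ R.items = (PySem.List.dedup (scarf.take m)).map (fun c => (c, pvLast (scarf.take m) c)) := by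
  induction m with
  | zero =>
    refine ⟨PySem.Dict.empty, PySem.Dict.empty, ?_, ?_, ?_⟩ <;> rfl
  | succ m ih =>
    obtain ⟨L, R, hfold, hL, hR⟩ := ih (Nat.le_of_succ_le hm)
    have hlt : m < scarf.length := hm
    have hrange : PySem.List.pyRange 0 ((m + 1 : Nat) : Int) 1
        = PySem.List.pyRange 0 (m : Int) 1 ++ [(m : Int)] := by
      push_cast
      exact PySem.List.pyRange_one_succ_right (by positivity)
    set c := scarf[m] with hc
    have hget : PySem.List.pyGet? scarf (m : Int) = some c := by
      rw [PySem.List.pyGet?_eq_some_getElem scarf (by positivity) (by exact_mod_cast hlt)]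
      simp [hc]
    have htake : scarf.take (m + 1) = scarf.take m ++ [c] := by
      rw [List.take_add_one, List.getElem?_eq_getElem hlt]
      rfl
    set t := scarf.take m with ht
    have htlen : t.length = m := by simp [ht, Nat.min_eq_left (Nat.le_of_succ_le hm)]
    have hLc : L.contains c = decide (c ∈ t) := pv_keys_of_items L t _ hL c
    have hRc : R.contains c = decide (c ∈ t) := pv_keys_of_items R t _ hR c
    rw [hrange, List.foldl_append, hfold]
    simp only [List.foldl_cons, List.foldl_nil, Option.bind_some, hget, Option.map_some]
    by_cases hmem : c ∈ t
    · -- repeated color: leftmost untouched, rightmost overwritten in place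
      refine ⟨L, R.insert c (m : Int), ?_, ?_, ?_⟩
      · simp [hLc, hmem]
      · rw [htake, pv_dedup_snoc, if_pos hmem, hL]
        apply List.map_congr_left
        intro x hx
        rw [pv_first_mem t c x ((PySem.List.mem_dedup t x).mp hx)]
      · rw [PySem.Dict.items_insert_of_contains R (m : Int) (by simp [hRc, hmem]), hR,
          List.map_map, htake, pv_dedup_snoc, if_pos hmem]
        apply List.map_congr_left
        intro x hx
        by_cases hxc : x = c
        · rw [hxc]
          simp [Function.comp, pv_last_new t c, htlen]
        · simp [Function.comp, hxc,
            pv_last_mem t c x ((PySem.List.mem_dedup t x).mp hx) hxc]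
    · -- new color: appended to both dicts
      refine ⟨L.insert c (m : Int), R.insert c (m : Int), ?_, ?_, ?_⟩
      · simp [hLc, hmem]
      · rw [PySem.Dict.items_insert_of_not_contains L (m : Int) (by simp [hLc, hmem]), hL,
          htake, pv_dedup_snoc, if_neg hmem, List.map_append]
        congr 1
        · apply List.map_congr_left
          intro x hx
          rw [pv_first_mem t c x ((PySem.List.mem_dedup t x).mp hx)]
        · simp [pv_first_new t c hmem, htlen]
      · rw [PySem.Dict.items_insert_of_not_contains R (m : Int) (by simp [hRc, hmem]), hR,
          htake, pv_dedup_snoc, if_neg hmem, List.map_append]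
        congr 1
        · apply List.map_congr_left
          intro x hx
          by_cases hxc : x = c
          · exact absurd (hxc ▸ (PySem.List.mem_dedup t x).mp hx) hmem
          · rw [pv_last_mem t c x ((PySem.List.mem_dedup t x).mp hx) hxc]
        · simp [pv_last_new t c, htlen]

-- B's two insert-folds over the distinct colors, characterized by items_foldl_insert_fresh
theorem pv_B_items (t : List Int) (v : Int → Int) :
    ((PySem.List.dedup t).foldl
        (fun (d : PySem.Dict Int Int) c => d.insert c (v c)) PySem.Dict.empty).items
      = (PySem.List.dedup t).map (fun c => (c, v c)) := by
  have := PySem.Dict.items_foldl_insert_fresh (PySem.List.dedup t) (fun c => c) v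
      PySem.Dict.empty (fun a _ => by simp) (by simpa using PySem.List.nodup_dedup t)
  simpa using this

-- ===== VERDICT (by name: the statement is the Claim_ definition above) =====
theorem get_mostidx_spec : Claim_equal_get_mostidx := by
  intro scarf scarf_len _ hpre
  unfold Pre_get_mostidx at hpre
  unfold Spec_get_mostidx
  by_cases hneg : scarf_len < 0
  · -- empty range, empty prefix: both return two empty dicts
    have hr : PySem.List.pyRange 0 scarf_len 1 = [] := by
      rw [PySem.List.pyRange_of_pos 0 scarf_len (by norm_num)]
      rw [if_neg (by omega)]
      rfl
    have hmax : max scarf_len 0 = 0 := by omega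
    simp only [get_mostidx, get_mostidx_alt, hr, hmax,
      PySem.List.slice_to scarf (le_refl 0)]
    rfl
  · push_neg at hneg
    set m := scarf_len.toNat with hmdef
    have hmi : (m : Int) = scarf_len := Int.toNat_of_nonneg hneg
    have hm : m ≤ scarf.length := by omega
    obtain ⟨L, R, hfold, hL, hR⟩ := pv_A_char scarf m hm
    simp only [get_mostidx, get_mostidx_alt, ← hmi, hfold]
    rw [show max ((m : Nat) : Int) 0 = ((m : Nat) : Int) by omega,
      PySem.List.slice_to scarf (Int.natCast_nonneg m)]
    simp only [Int.toNat_natCast]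
    rw [hL, hR,
      pv_B_items (scarf.take m)
        (fun c => (((PySem.List.index? (scarf.take m) c).getD 0 : Nat) : Int)),
      pv_B_items (scarf.take m)
        (fun c => ((scarf.take m).length : Int) - 1 -
          (((PySem.List.index? (scarf.take m).reverse c).getD 0 : Nat) : Int))]
    simp [pvFirst, pvLast]
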